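-- pv_equiv track=rewrite | github.com/marcobaldi97/AdventOfCode2020MarcoBaldi | skipping-work.py | solution
-- ===== SOURCE A (Python) =====
-- def solution(x: list, y: list):
--     solution = {}
--     if y.__len__() > x.__len__():
--         aux = x
--         x = y
--         y = aux
--     for number in x:
--         solution[number] = 1
--     for number in y:
--         if solution.keys().__contains__(number):
--             solution.pop(number)
--     return list(solution.keys())[0]
-- ===== SOURCE B (Python) =====
-- def solution(x: list, y: list):
--     if len(y) > len(x):
--         x, y = y, x
--     # peel the head of the longer list until one survives the membership test;
--     # x[0] raises IndexError when nothing survives, as in A's list(...)[0]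
--     while x[0] in y:
--         x = x[1:]
--     return x[0]
-- ===== Notes on version B (the rewrite author's own statement) =====
-- stated objective: alternative
-- what changed: A builds a hash table over the larger list and then runs a deletion pass keyed by the smaller list before indexing the surviving keys; B builds no table at all: a recursive helper peels elements off the larger list one by one and tests each directly against the smaller list, returning the first one not found.
import Mathlib
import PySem

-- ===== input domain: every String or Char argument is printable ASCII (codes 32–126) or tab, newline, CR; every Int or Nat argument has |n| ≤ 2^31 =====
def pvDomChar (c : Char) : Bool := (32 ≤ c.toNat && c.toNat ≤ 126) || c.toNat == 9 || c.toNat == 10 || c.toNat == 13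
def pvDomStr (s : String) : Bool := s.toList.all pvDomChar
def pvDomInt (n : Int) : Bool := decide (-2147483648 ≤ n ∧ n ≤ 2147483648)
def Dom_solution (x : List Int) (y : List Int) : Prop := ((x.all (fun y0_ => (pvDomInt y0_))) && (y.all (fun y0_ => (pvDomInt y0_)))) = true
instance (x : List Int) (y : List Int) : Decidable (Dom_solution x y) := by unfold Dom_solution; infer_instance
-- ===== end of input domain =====

-- B replaces A's build-a-hash-table-then-delete passes by a head-peeling loop with a
-- direct membership scan of the shorter list — no auxiliary structure (alternative, not faster).

-- ===== PORT A =====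
def solution (x : List Int) (y : List Int) : Int :=
  let p := if y.length > x.length then (y, x) else (x, y)
  let d := p.1.foldl (fun d number => d.insert number (1 : Int)) PySem.Dict.empty
  let d := p.2.foldl (fun d number => if d.contains number then d.erase number else d) d
  -- list(solution.keys())[0]: IndexError when no key is left — excluded by Pre_solution,
  -- so the .getD 0 default is never taken on admitted inputs
  (PySem.List.pyGet? d.keys 0).getD 0

-- ===== PORT B =====
-- the 'while x[0] in y: x = x[1:]' loop followed by 'return x[0]';
-- the [] case is Python's IndexError on x[0] — excluded by Pre_solution
def peelLoop : List Int → List Int → Int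
  | [], _ => 0
  | a :: tl, y => if y.contains a then peelLoop tl y else a

def solution_alt (x : List Int) (y : List Int) : Int :=
  let p := if y.length > x.length then (y, x) else (x, y)
  peelLoop p.1 p.2

-- ===== PRECONDITION & SPEC =====
-- Pre_ excludes exactly the inputs on which A raises IndexError (every element of the
-- longer list also occurs in the shorter one); B raises IndexError there too.
def Pre_solution (x : List Int) (y : List Int) : Prop :=
  if y.length > x.length then ∃ n ∈ y, n ∉ x else ∃ n ∈ x, n ∉ y
instance (x : List Int) (y : List Int) : Decidable (Pre_solution x y) := by
  unfold Pre_solution; infer_instance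
def pvWitness_solution : List Int × List Int := ([1, 2], [2])

def Spec_solution (x : List Int) (y : List Int) (out : Int) : Prop := out = solution_alt x y
instance (x : List Int) (y : List Int) (out : Int) : Decidable (Spec_solution x y out) := by
  unfold Spec_solution; infer_instance

-- ===== CLAIM (what is proved, stated in full; the proofs are below) =====
def Claim_equal_solution : Prop := ∀ (x : List Int) (y : List Int), Dom_solution x y → Pre_solution x y → Spec_solution x y (solution x y)

-- ===== LEMMAS AND PROOFS =====

theorem pv_pyGet?_zero_head (l : List Int) : PySem.List.pyGet? l 0 = l.head? := by
  cases l <;> simp [PySem.List.pyGet?, PySem.List.pyIdx?]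

theorem pv_map_fst_filter (q : Int → Bool) (l : List (Int × Int)) :
    (l.filter (fun p => q p.1)).map Prod.fst = (l.map Prod.fst).filter q := by
  induction l with
  | nil => rfl
  | cons hd tl ih => by_cases h : q hd.1 <;> simp [List.filter_cons, h, ih]

theorem pv_keys_erase (d : PySem.Dict Int Int) (n : Int) :
    (d.erase n).keys = d.keys.filter (fun k => !(k == n)) := by
  simp only [PySem.Dict.keys, PySem.Dict.erase]
  exact pv_map_fst_filter (fun k => !(k == n)) d.items

theorem pv_step_keys (d : PySem.Dict Int Int) (n : Int) :
    (if d.contains n then d.erase n else d).keys = d.keys.filter (fun k => !(k == n)) := by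
  by_cases h : d.contains n
  · simp [h, pv_keys_erase]
  · rw [if_neg h]
    have hn : n ∉ d.keys := fun hm => h ((PySem.Dict.contains_iff_mem_keys d n).mpr hm)
    symm
    apply List.filter_eq_self.mpr
    intro a ha
    have hne : a ≠ n := fun he => hn (he ▸ ha)
    simp [hne]

theorem pv_erase_loop_keys (Y : List Int) (d : PySem.Dict Int Int) :
    (Y.foldl (fun d n => if d.contains n then d.erase n else d) d).keys
      = d.keys.filter (fun k => !(Y.contains k)) := by
  induction Y generalizing d with
  | nil => simp
  | cons n ys ih =>
      rw [List.foldl_cons, ih, pv_step_keys, List.filter_filter]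
      apply List.filter_congr
      intro a _
      cases h1 : (a == n) <;> cases h2 : ys.contains a <;>
        simp_all [List.contains_cons]

theorem pv_update_eq_foldl (s : PySem.Set Int) (xs : List Int) :
    PySem.Set.update s xs = xs.foldl PySem.Set.add s := by
  induction xs generalizing s with
  | nil => simp [PySem.Set.update_nil]
  | cons a tl ih => rw [PySem.Set.update_cons, List.foldl_cons, ih]

theorem pv_ofList_cons (a : Int) (xs : List Int) :
    PySem.Set.ofList (a :: xs) = a :: (PySem.Set.ofList xs).filter (fun y => !(y == a)) := by
  have h1 : PySem.Set.ofList (a :: xs) = xs.foldl PySem.Set.add (PySem.Set.add PySem.Set.empty a) := by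
    simp [PySem.Set.ofList]
  have h2 : PySem.Set.add PySem.Set.empty a = [a] := by
    simp [PySem.Set.add, PySem.Set.empty, PySem.Set.contains]
  rw [h1, h2, ← pv_update_eq_foldl, PySem.Set.update_eq_append_filter]
  simp only [List.singleton_append, List.cons.injEq, true_and]
  apply List.filter_congr
  intro b _
  simp only [PySem.Set.contains, List.contains_cons, List.contains_nil, Bool.or_false]

theorem pv_head_filter_ofList (xs : List Int) (p : Int → Bool) :
    ((PySem.Set.ofList xs).filter p).head? = (xs.filter p).head? := by
  induction xs with
  | nil => rfl
  | cons a tl ih =>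
      rw [pv_ofList_cons]
      by_cases hp : p a
      · simp [hp]
      · simp only [List.filter_cons, hp, Bool.false_eq_true, if_false, List.filter_filter]
        rw [← ih]
        apply congrArg
        apply List.filter_congr
        intro b _
        by_cases hb : b = a
        · subst hb; simp [hp]
        · simp [hb]

theorem pv_peelLoop_eq (X Y : List Int) :
    peelLoop X Y = ((X.filter (fun k => !(Y.contains k))).head?).getD 0 := by
  induction X with
  | nil => rfl
  | cons a tl ih =>
      by_cases h : Y.contains a <;>
        simp_all [peelLoop, List.filter_cons]

theorem pv_core (X Y : List Int) :
    (PySem.List.pyGet?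
        ((Y.foldl (fun d n => if d.contains n then d.erase n else d)
            (X.foldl (fun d number => d.insert number (1 : Int)) PySem.Dict.empty)).keys) 0).getD 0
    = peelLoop X Y := by
  have hk : (X.foldl (fun d number => d.insert number (1 : Int)) PySem.Dict.empty).keys
      = PySem.Set.ofList X := by
    rw [PySem.Dict.keys_foldl_insert X (fun _ _ => (1 : Int)) PySem.Dict.empty,
      PySem.Dict.keys_empty, pv_update_eq_foldl]
    rfl
  rw [pv_erase_loop_keys, hk, pv_pyGet?_zero_head, pv_head_filter_ofList, pv_peelLoop_eq]

-- ===== VERDICT (by name: the statement is the Claim_ definition above) =====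
theorem solution_spec : Claim_equal_solution := by
  intro x y _ _
  unfold Spec_solution solution solution_alt
  by_cases h : y.length > x.length
  · simp only [h, if_true]
    exact pv_core y x
  · simp only [h, if_false]
    exact pv_core x y
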